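-- pv_equiv track=rewrite | github.com/ZZy979/LeetCode | Algorithms/1030/allCellsDistOrder_2.py | allCellsDistOrder
-- ===== SOURCE A (Python) =====
-- from typing import List
--
-- def allCellsDistOrder(R: int, C: int, r0: int, c0: int) -> List[List[int]]:
--     dirs = [(1, 1), (1, -1), (-1, -1), (-1, 1)]
--     maxDist = max(r0, R - 1 - r0) + max(c0, C - 1 - c0)
--     row, col = r0, c0
--     ret = [[row, col]]
--     for dist in range(1, maxDist + 1):
--         row -= 1
--         for i, (dr, dc) in enumerate(dirs):
--             while (i % 2 == 0 and row != r0) or (i % 2 != 0 and col != c0):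
--                 if 0 <= row < R and 0 <= col < C:
--                     ret.append([row, col])
--                 row += dr
--                 col += dc
--     return ret
-- ===== SOURCE B (Python) =====
-- def allCellsDistOrder(R, C, r0, c0):
--     # Walk distance rings, but clip each of the four diamond edges to the grid
--     # bounds and emit only the in-bounds cells directly (no per-cell test).
--     maxDist = max(r0, R - 1 - r0) + max(c0, C - 1 - c0)
--     ret = [[r0, c0]]
--     for d in range(1, maxDist + 1):
--         for sr, sc, dr, dc in ((r0 - d, c0, 1, 1), (r0, c0 + d, 1, -1),
--                                (r0 + d, c0, -1, -1), (r0, c0 - d, -1, 1)):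
--             # edge cells are (sr + dr*k, sc + dc*k) for k in range(d)
--             if dr == 1:
--                 lo_r, hi_r = -sr, R - 1 - sr
--             else:
--                 lo_r, hi_r = sr - (R - 1), sr
--             if dc == 1:
--                 lo_c, hi_c = -sc, C - 1 - sc
--             else:
--                 lo_c, hi_c = sc - (C - 1), sc
--             lo = max(0, lo_r, lo_c)
--             hi = min(d - 1, hi_r, hi_c)
--             for k in range(lo, hi + 1):
--                 ret.append([sr + dr * k, sc + dc * k])
--     return ret
-- ===== Notes on version B (the rewrite author's own statement) =====
-- stated objective: faster
-- what changed: A walks every cell of each distance ring (four diagonal sweeps with a per-cell bounds test, O((R+C)^2) work total); B clips each of the four diamond edges to the grid bounds arithmetically and emits only the in-bounds cells of each ring, so out-of-grid ring cells are never visited.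
import Mathlib
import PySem

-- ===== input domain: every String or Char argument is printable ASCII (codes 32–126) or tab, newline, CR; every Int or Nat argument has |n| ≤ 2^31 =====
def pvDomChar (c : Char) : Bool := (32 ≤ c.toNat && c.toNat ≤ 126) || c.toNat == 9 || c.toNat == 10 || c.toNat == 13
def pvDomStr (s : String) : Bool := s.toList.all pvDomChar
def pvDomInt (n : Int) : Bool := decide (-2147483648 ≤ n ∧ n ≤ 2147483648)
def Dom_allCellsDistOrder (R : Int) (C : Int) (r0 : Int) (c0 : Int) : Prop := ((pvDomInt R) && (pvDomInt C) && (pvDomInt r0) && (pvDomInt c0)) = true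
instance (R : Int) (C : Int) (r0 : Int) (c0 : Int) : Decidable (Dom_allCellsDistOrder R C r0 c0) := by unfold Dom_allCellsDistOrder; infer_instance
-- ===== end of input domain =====

-- B replaces A's per-cell walk around each distance ring (with a bounds test on every
-- visited cell, O((R+C)^2) total) by clipping each of the four diamond edges to the grid
-- and emitting only the in-bounds cells; objective: faster (asymptotic).

-- ===== PORT A =====
-- The inner `while` loop of A, ported with a fuel argument; A's walk along edge i of the
-- distance-`dist` ring takes exactly `dist` steps, so the caller passes fuel = dist.toNat
-- (the fuel guard only makes the recursion total; it is never hit on A's states).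
def pvWhileEdge (R : Int) (C : Int) (r0 : Int) (c0 : Int) (i : Int) (dr : Int) (dc : Int) :
    Nat → Int → Int → List (List Int) → Int × Int × List (List Int)
  | 0, row, col, ret => (row, col, ret)
  | fuel+1, row, col, ret =>
    if (PySem.Int.mod i 2 == 0 && !(row == r0)) || (!(PySem.Int.mod i 2 == 0) && !(col == c0)) then
      pvWhileEdge R C r0 c0 i dr dc fuel (row + dr) (col + dc)
        (if 0 ≤ row ∧ row < R ∧ 0 ≤ col ∧ col < C then ret ++ [[row, col]] else ret)
    else (row, col, ret)

-- body of A's `for dist in range(1, maxDist+1)` loop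
def pvBodyA (R : Int) (C : Int) (r0 : Int) (c0 : Int)
    (st : Int × Int × List (List Int)) (dist : Int) : Int × Int × List (List Int) :=
  let row := st.1 - 1
  (PySem.List.enumerate [((1:Int),(1:Int)),(1,-1),(-1,-1),(-1,1)] 0).foldl
    (fun st p => pvWhileEdge R C r0 c0 p.1 p.2.1 p.2.2 dist.toNat st.1 st.2.1 st.2.2)
    (row, st.2.1, st.2.2)

def allCellsDistOrder (R : Int) (C : Int) (r0 : Int) (c0 : Int) : List (List Int) :=
  let maxDist := max r0 (R - 1 - r0) + max c0 (C - 1 - c0)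
  ((PySem.List.pyRange 1 (maxDist + 1) 1).foldl (pvBodyA R C r0 c0)
    (r0, c0, [[r0, c0]])).2.2

-- ===== PORT B =====
-- one clipped diamond edge: cells (sr + dr*k, sc + dc*k) for k in range(lo, hi+1)
def pvClipEdge (R : Int) (C : Int) (ret : List (List Int))
    (d : Int) (sr : Int) (sc : Int) (dr : Int) (dc : Int) : List (List Int) :=
  let lr := if dr == 1 then (-sr, R - 1 - sr) else (sr - (R - 1), sr)
  let lc := if dc == 1 then (-sc, C - 1 - sc) else (sc - (C - 1), sc)
  let lo := max (max 0 lr.1) lc.1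
  let hi := min (min (d - 1) lr.2) lc.2
  (PySem.List.pyRange lo (hi + 1) 1).foldl
    (fun ret k => ret ++ [[sr + dr * k, sc + dc * k]]) ret

-- body of B's `for d in range(1, maxDist+1)` loop
def pvBodyB (R : Int) (C : Int) (r0 : Int) (c0 : Int)
    (ret : List (List Int)) (d : Int) : List (List Int) :=
  [(r0 - d, c0, (1:Int), (1:Int)), (r0, c0 + d, 1, -1), (r0 + d, c0, -1, -1), (r0, c0 - d, -1, 1)].foldl
    (fun ret e => pvClipEdge R C ret d e.1 e.2.1 e.2.2.1 e.2.2.2) ret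

def allCellsDistOrder_alt (R : Int) (C : Int) (r0 : Int) (c0 : Int) : List (List Int) :=
  let maxDist := max r0 (R - 1 - r0) + max c0 (C - 1 - c0)
  (PySem.List.pyRange 1 (maxDist + 1) 1).foldl (pvBodyB R C r0 c0) [[r0, c0]]

-- ===== PRECONDITION & SPEC =====
def Spec_allCellsDistOrder (R : Int) (C : Int) (r0 : Int) (c0 : Int) (out : List (List Int)) : Prop := out = allCellsDistOrder_alt R C r0 c0
instance (R : Int) (C : Int) (r0 : Int) (c0 : Int) (out : List (List Int)) : Decidable (Spec_allCellsDistOrder R C r0 c0 out) := by unfold Spec_allCellsDistOrder; infer_instance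

-- ===== CLAIM (what is proved, stated in full; the proofs are below) =====
def Claim_equal_allCellsDistOrder : Prop := ∀ (R : Int) (C : Int) (r0 : Int) (c0 : Int), Dom_allCellsDistOrder R C r0 c0 → Spec_allCellsDistOrder R C r0 c0 (allCellsDistOrder R C r0 c0)

-- ===== LEMMAS AND PROOFS =====

-- the cells A's walk appends along one edge: n steps from (row, col), direction (dr, dc),
-- keeping the in-bounds ones
def pvEmit (R : Int) (C : Int) (dr : Int) (dc : Int) : Nat → Int → Int → List (List Int)
  | 0, _, _ => []
  | n+1, row, col =>
    (if 0 ≤ row ∧ row < R ∧ 0 ≤ col ∧ col < C then [[row, col]] else []) ++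
      pvEmit R C dr dc n (row + dr) (col + dc)

theorem pvWhileEdge_even (R C r0 c0 i dr dc : Int) (hi : PySem.Int.mod i 2 = 0)
    (hdr : dr = 1 ∨ dr = -1) :
    ∀ (n : Nat) (row col : Int) (ret : List (List Int)), row = r0 - dr * n →
      pvWhileEdge R C r0 c0 i dr dc n row col ret
        = (r0, col + dc * n, ret ++ pvEmit R C dr dc n row col) := by
  intro n
  induction n with
  | zero =>
    intro row col ret hrow
    have : row = r0 := by rw [hrow]; push_cast; ring
    subst this
    simp [pvWhileEdge, pvEmit]
  | succ n ih =>
    intro row col ret hrow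
    have hne : (row == r0) = false := by
      rcases hdr with h | h <;> (subst h; rw [beq_eq_false_iff_ne]; push_cast at hrow; omega)
    rw [pvWhileEdge, hi, hne]
    simp only [beq_self_eq_true, Bool.not_false, Bool.true_and, Bool.not_true, Bool.false_and,
      Bool.or_false]
    rw [ih (row + dr) (col + dc) _ (by rw [hrow]; push_cast; ring)]
    rw [if_pos trivial, pvEmit]
    refine Prod.ext rfl (Prod.ext (by push_cast; ring) ?_)
    split_ifs <;> simp

theorem pvWhileEdge_odd (R C r0 c0 i dr dc : Int) (hi : PySem.Int.mod i 2 = 1)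
    (hdc : dc = 1 ∨ dc = -1) :
    ∀ (n : Nat) (row col : Int) (ret : List (List Int)), col = c0 - dc * n →
      pvWhileEdge R C r0 c0 i dr dc n row col ret
        = (row + dr * n, c0, ret ++ pvEmit R C dr dc n row col) := by
  intro n
  induction n with
  | zero =>
    intro row col ret hcol
    have : col = c0 := by rw [hcol]; push_cast; ring
    subst this
    simp [pvWhileEdge, pvEmit]
  | succ n ih =>
    intro row col ret hcol
    have hne : (col == c0) = false := by
      rcases hdc with h | h <;> (subst h; rw [beq_eq_false_iff_ne]; push_cast at hcol; omega)
    rw [pvWhileEdge, hi, hne]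
    simp only [show ((1:Int) == 0) = false from rfl, Bool.not_false, Bool.false_and,
      Bool.true_and, Bool.false_or]
    rw [ih (row + dr) (col + dc) _ (by rw [hcol]; push_cast; ring)]
    rw [if_pos trivial, pvEmit]
    refine Prod.ext (by push_cast; ring) (Prod.ext rfl ?_)
    split_ifs <;> simp

theorem pvEmit_eq_filterMap (R C dr dc : Int) :
    ∀ (n : Nat) (row col : Int),
      pvEmit R C dr dc n row col
        = (List.range n).filterMap (fun k : Nat =>
            if 0 ≤ row + dr * (k:Int) ∧ row + dr * (k:Int) < R ∧ 0 ≤ col + dc * (k:Int) ∧ col + dc * (k:Int) < C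
            then some [row + dr * (k:Int), col + dc * (k:Int)] else none) := by
  intro n
  induction n with
  | zero => intro row col; simp [pvEmit]
  | succ n ih =>
    intro row col
    rw [pvEmit, List.range_succ_eq_map, List.filterMap_cons, List.filterMap_map]
    have hfun : ((fun k : Nat => if 0 ≤ row + dr * (k:Int) ∧ row + dr * (k:Int) < R ∧ 0 ≤ col + dc * (k:Int) ∧ col + dc * (k:Int) < C
            then some [row + dr * (k:Int), col + dc * (k:Int)] else none) ∘ Nat.succ)
        = (fun k : Nat => if 0 ≤ (row + dr) + dr * (k:Int) ∧ (row + dr) + dr * (k:Int) < R ∧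
              0 ≤ (col + dc) + dc * (k:Int) ∧ (col + dc) + dc * (k:Int) < C
            then some [(row + dr) + dr * (k:Int), (col + dc) + dc * (k:Int)] else none) := by
      funext k
      have h1 : row + dr * ((Nat.succ k : Nat) : Int) = (row + dr) + dr * (k:Int) := by push_cast; ring
      have h2 : col + dc * ((Nat.succ k : Nat) : Int) = (col + dc) + dc * (k:Int) := by push_cast; ring
      simp only [Function.comp_apply, h1, h2]
    rw [hfun, ← ih]
    norm_num
    split_ifs <;> simp

theorem pvFilterMap_range_interval {α : Type} (f : Int → α) :
    ∀ (n : Nat) (lo hi : Int), 0 ≤ lo → hi < (n : Int) →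
      (List.range n).filterMap (fun k : Nat =>
          if lo ≤ (k : Int) ∧ (k : Int) ≤ hi then some (f (k : Int)) else none)
        = (PySem.List.pyRange lo (hi + 1) 1).map f := by
  intro n
  induction n with
  | zero =>
    intro lo hi hlo hhi
    rw [PySem.List.pyRange_one_eq_nil (by omega)]
    simp
  | succ n ih =>
    intro lo hi hlo hhi
    rw [List.range_succ, List.filterMap_append]
    by_cases h : hi < (n : Int)
    · rw [ih lo hi hlo h]
      have : ((n : Int) ≤ hi) = False := by simp; omega
      simp [this]
    · have hhin : hi = (n : Int) := by omega
      subst hhin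
      by_cases hln : lo ≤ (n : Int)
      · have hcong : ∀ k ∈ List.range n,
            (if lo ≤ (k : Int) ∧ (k : Int) ≤ (n : Int) then some (f (k : Int)) else none)
            = (if lo ≤ (k : Int) ∧ (k : Int) ≤ (n : Int) - 1 then some (f (k : Int)) else none) := by
          intro k hk
          rw [List.mem_range] at hk
          have hiff : (lo ≤ (k : Int) ∧ (k : Int) ≤ (n : Int)) ↔
              (lo ≤ (k : Int) ∧ (k : Int) ≤ (n : Int) - 1) := by omega
          rw [if_congr hiff rfl rfl]
        rw [List.filterMap_congr hcong, ih lo ((n : Int) - 1) hlo (by omega)]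
        rw [show (n : Int) - 1 + 1 = (n : Int) from by ring]
        rw [PySem.List.pyRange_one_succ_right hln, List.map_append]
        simp [hln]
      · have h1 : (PySem.List.pyRange lo ((n : Int) + 1) 1) = [] :=
          PySem.List.pyRange_one_eq_nil (by omega)
        have hcong : ∀ k ∈ List.range n,
            (if lo ≤ (k : Int) ∧ (k : Int) ≤ (n : Int) then some (f (k : Int)) else none)
            = (none : Option α) := by
          intro k hk
          rw [List.mem_range] at hk
          rw [if_neg (by omega)]
        rw [List.filterMap_congr hcong, h1]
        simp [show ¬ (lo ≤ (n:Int)) from hln]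

theorem pvFoldl_append_singleton {α β : Type} (g : α → β) :
    ∀ (l : List α) (init : List β),
      l.foldl (fun acc x => acc ++ [g x]) init = init ++ l.map g := by
  intro l
  induction l with
  | nil => intro init; simp
  | cons x xs ih => intro init; simp [List.foldl_cons, ih]

theorem pvClip_core (R C : Int) (ret : List (List Int)) (n : Nat)
    (sr sc dr dc lor hir loc hic : Int)
    (hbr : ∀ k : Int, (0 ≤ sr + dr * k ∧ sr + dr * k < R) ↔ (lor ≤ k ∧ k ≤ hir))
    (hbc : ∀ k : Int, (0 ≤ sc + dc * k ∧ sc + dc * k < C) ↔ (loc ≤ k ∧ k ≤ hic)) :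
    (PySem.List.pyRange (max (max 0 lor) loc) (min (min ((n:Int) - 1) hir) hic + 1) 1).foldl
        (fun ret k => ret ++ [[sr + dr * k, sc + dc * k]]) ret
      = ret ++ pvEmit R C dr dc n sr sc := by
  rw [pvFoldl_append_singleton, pvEmit_eq_filterMap]
  congr 1
  rw [← pvFilterMap_range_interval (fun k : Int => [sr + dr * k, sc + dc * k]) n
        (max (max 0 lor) loc) (min (min ((n:Int) - 1) hir) hic)
        (le_max_of_le_left (le_max_left _ _)) (by omega)]
  refine List.filterMap_congr ?_
  intro k hk
  rw [List.mem_range] at hk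
  have h1 := hbr (k : Int)
  have h2 := hbc (k : Int)
  have hcond : (0 ≤ sr + dr * (k:Int) ∧ sr + dr * (k:Int) < R ∧
        0 ≤ sc + dc * (k:Int) ∧ sc + dc * (k:Int) < C)
      ↔ (max (max 0 lor) loc ≤ (k:Int) ∧ (k:Int) ≤ min (min ((n:Int) - 1) hir) hic) := by
    generalize sr + dr * (k:Int) = a at h1 ⊢
    generalize sc + dc * (k:Int) = b at h2 ⊢
    simp only [max_le_iff, le_min_iff]
    omega
  rw [if_congr hcond rfl rfl]

theorem pvClipEdge_eq_emit (R C : Int) (ret : List (List Int)) (n : Nat) (d sr sc dr dc : Int)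
    (hd : d = (n : Int)) (hdr : dr = 1 ∨ dr = -1) (hdc : dc = 1 ∨ dc = -1) :
    pvClipEdge R C ret d sr sc dr dc = ret ++ pvEmit R C dr dc n sr sc := by
  subst hd
  unfold pvClipEdge
  rcases hdr with h1 | h1 <;> rcases hdc with h2 | h2 <;> subst h1 <;> subst h2 <;>
    simp only [show ((1:Int) == 1) = true from rfl, show ((-1:Int) == 1) = false from rfl,
      Bool.false_eq_true, reduceIte] <;>
    exact pvClip_core R C ret n _ _ _ _ _ _ _ _ (fun k => by omega) (fun k => by omega)

theorem pvRing_step (R C r0 c0 : Int) (n : Nat) (ret : List (List Int)) :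
    pvBodyA R C r0 c0 (r0 - ((n:Int) - 1), c0, ret) (n : Int)
      = (r0 - n, c0, pvBodyB R C r0 c0 ret (n : Int)) := by
  unfold pvBodyA pvBodyB
  dsimp only
  simp only [PySem.List.enumerate_cons, PySem.List.enumerate_nil, List.foldl_cons, List.foldl_nil,
    Int.toNat_natCast]
  have hrw : r0 - ((n:Int) - 1) - 1 = r0 - (n:Int) := by ring
  rw [hrw]
  rw [pvWhileEdge_even R C r0 c0 0 1 1 rfl (Or.inl rfl) n _ _ _ (by ring)]
  rw [pvWhileEdge_odd R C r0 c0 (0+1) 1 (-1) rfl (Or.inr rfl) n _ _ _ (by ring)]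
  rw [pvWhileEdge_even R C r0 c0 (0+1+1) (-1) (-1) rfl (Or.inr rfl) n _ _ _ (by ring)]
  rw [pvWhileEdge_odd R C r0 c0 (0+1+1+1) (-1) 1 rfl (Or.inl rfl) n _ _ _ (by ring)]
  rw [pvClipEdge_eq_emit R C ret n _ _ _ _ _ rfl (Or.inl rfl) (Or.inl rfl)]
  rw [pvClipEdge_eq_emit R C _ n _ _ _ _ _ rfl (Or.inl rfl) (Or.inr rfl)]
  rw [pvClipEdge_eq_emit R C _ n _ _ _ _ _ rfl (Or.inr rfl) (Or.inr rfl)]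
  rw [pvClipEdge_eq_emit R C _ n _ _ _ _ _ rfl (Or.inr rfl) (Or.inl rfl)]
  refine Prod.ext (by ring) (Prod.ext rfl ?_)
  simp only [List.append_assoc]
  ring_nf

theorem pvMain (R C r0 c0 : Int) :
    ∀ (M : Nat) (ret : List (List Int)),
      (PySem.List.pyRange 1 ((M : Int) + 1) 1).foldl (pvBodyA R C r0 c0) (r0, c0, ret)
        = (r0 - M, c0, (PySem.List.pyRange 1 ((M : Int) + 1) 1).foldl (pvBodyB R C r0 c0) ret) := by
  intro M
  induction M with
  | zero =>
    intro ret
    rw [PySem.List.pyRange_one_eq_nil (by norm_num)]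
    simp
  | succ M ih =>
    intro ret
    have hsplit : (PySem.List.pyRange 1 (((M+1 : Nat) : Int) + 1) 1)
        = PySem.List.pyRange 1 ((M : Int) + 1) 1 ++ [(M : Int) + 1] := by
      have := PySem.List.pyRange_one_succ_right (a := 1) (b := (M : Int) + 1) (by omega)
      rw [← this]
      norm_num
    rw [hsplit, List.foldl_append, List.foldl_append, ih]
    simp only [List.foldl_cons, List.foldl_nil]
    have : (r0 - (M : Int)) = r0 - (((M+1 : Nat) : Int) - 1) := by push_cast; ring
    rw [show ((M : Int) + 1) = ((M+1 : Nat) : Int) from by push_cast; ring, this,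
      pvRing_step R C r0 c0 (M+1)]

-- ===== VERDICT (by name: the statement is the Claim_ definition above) =====
theorem allCellsDistOrder_spec : Claim_equal_allCellsDistOrder := by
  intro R C r0 c0 _
  unfold Spec_allCellsDistOrder allCellsDistOrder allCellsDistOrder_alt
  dsimp only
  set m := max r0 (R - 1 - r0) + max c0 (C - 1 - c0) with hm
  by_cases h : m + 1 ≤ 1
  · rw [PySem.List.pyRange_one_eq_nil h]
    simp
  · have h0 : 0 ≤ m := by omega
    obtain ⟨M, hM⟩ : ∃ M : Nat, m = (M : Int) := ⟨m.toNat, by omega⟩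
    rw [hM, pvMain]
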